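-- pv_equiv track=rewrite | github.com/robomechanics/magnetic-sim | legged_sim/sim.py | _foot_surfaces
-- ===== SOURCE A (Python) =====
-- FEET        = ('FL', 'FR', 'BL', 'BR')
--
-- def _foot_surfaces(swing_foot: str, wall_feet: set) -> dict:
--     """Return expected surface for each foot: 'floor', 'wall', or 'swing'."""
--     out = {}
--     for foot in FEET:
--         if foot == swing_foot:
--             out[foot] = 'swing'
--         elif foot in wall_feet:
--             out[foot] = 'wall'
--         else:
--             out[foot] = 'floor'
--     return out
-- ===== SOURCE B (Python) =====
-- FEET = ('FL', 'FR', 'BL', 'BR')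
--
-- def _foot_surfaces(swing_foot, wall_feet):
--     """Initialize every foot to 'floor', then override walls, then the swing foot last."""
--     out = {foot: 'floor' for foot in FEET}
--     for foot in wall_feet:
--         if foot in out:
--             out[foot] = 'wall'
--     if swing_foot in out:
--         out[swing_foot] = 'swing'
--     return out
-- ===== Notes on version B (the rewrite author's own statement) =====
-- stated objective: simpler
-- what changed: Replaces the per-foot swing/wall/floor priority cascade by an initialize-then-override pass: all feet start as 'floor', wall feet are overridden by looping over wall_feet, and the swing foot is written last so it wins.
import Mathlib
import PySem

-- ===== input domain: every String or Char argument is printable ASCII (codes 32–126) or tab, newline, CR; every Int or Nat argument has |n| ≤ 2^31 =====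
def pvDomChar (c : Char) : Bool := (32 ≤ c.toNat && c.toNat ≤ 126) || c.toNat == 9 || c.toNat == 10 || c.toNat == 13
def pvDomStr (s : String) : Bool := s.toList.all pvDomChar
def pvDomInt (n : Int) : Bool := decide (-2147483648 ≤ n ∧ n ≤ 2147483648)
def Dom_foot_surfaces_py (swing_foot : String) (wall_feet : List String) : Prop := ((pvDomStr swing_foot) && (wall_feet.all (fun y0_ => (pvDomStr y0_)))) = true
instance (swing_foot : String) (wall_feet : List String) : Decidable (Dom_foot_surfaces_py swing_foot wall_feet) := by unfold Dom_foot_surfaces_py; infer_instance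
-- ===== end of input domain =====

-- ===== PORT A =====
-- B replaces A's per-foot swing/wall/floor branch cascade by an initialize-then-override pass (all feet 'floor', then wall feet, then the swing foot last); objective: simpler.
-- FEET = ('FL', 'FR', 'BL', 'BR')
def pvFEET : List String := ["FL", "FR", "BL", "BR"]

def foot_surfaces_py (swing_foot : String) (wall_feet : List String) : List (String × String) :=
  (pvFEET.foldl (fun out foot =>
      if foot = swing_foot then out.insert foot "swing"
      else if wall_feet.contains foot then out.insert foot "wall"
      else out.insert foot "floor")
    PySem.Dict.empty).items

-- ===== PORT B =====
def foot_surfaces_py_alt (swing_foot : String) (wall_feet : List String) : List (String × String) :=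
  let out0 : PySem.Dict String String := pvFEET.foldl (fun d foot => d.insert foot "floor") PySem.Dict.empty
  let out1 := wall_feet.foldl (fun d foot => if d.contains foot then d.insert foot "wall" else d) out0
  let out2 := if out1.contains swing_foot then out1.insert swing_foot "swing" else out1
  out2.items

-- ===== PRECONDITION & SPEC ===== (A is total: no Pre_)
def Spec_foot_surfaces_py (swing_foot : String) (wall_feet : List String) (out : List (String × String)) : Prop := out = foot_surfaces_py_alt swing_foot wall_feet
instance (swing_foot : String) (wall_feet : List String) (out : List (String × String)) : Decidable (Spec_foot_surfaces_py swing_foot wall_feet out) := by unfold Spec_foot_surfaces_py; infer_instance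

-- ===== CLAIM (what is proved, stated in full; the proofs are below) =====
def Claim_equal_foot_surfaces_py : Prop := ∀ (swing_foot : String) (wall_feet : List String), Dom_foot_surfaces_py swing_foot wall_feet → Spec_foot_surfaces_py swing_foot wall_feet (foot_surfaces_py swing_foot wall_feet)

-- ===== LEMMAS AND PROOFS =====

-- A's cascade returns the four feet in order, each with its nested-if surface value.
theorem pv_portA_items (s : String) (w : List String) :
    foot_surfaces_py s w =
      [("FL", if "FL" = s then "swing" else if w.contains "FL" then "wall" else "floor"),
       ("FR", if "FR" = s then "swing" else if w.contains "FR" then "wall" else "floor"),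
       ("BL", if "BL" = s then "swing" else if w.contains "BL" then "wall" else "floor"),
       ("BR", if "BR" = s then "swing" else if w.contains "BR" then "wall" else "floor")] := by
  have hstep : ∀ (d : PySem.Dict String String) (foot : String),
      (if foot = s then d.insert foot "swing"
       else if w.contains foot then d.insert foot "wall" else d.insert foot "floor")
      = d.insert foot (if foot = s then "swing" else if w.contains foot then "wall" else "floor") := by
    intro d foot; split_ifs <;> rfl
  unfold foot_surfaces_py pvFEET
  simp only [List.foldl]
  rw [hstep, hstep, hstep, hstep]
  simp [PySem.Dict.items_insert, PySem.Dict.contains_insert, PySem.Dict.empty]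

-- B's wall-override loop, on a dict whose keys are exactly the four feet, rewrites values in place.
theorem pv_loopB (w : List String) (v1 v2 v3 v4 : String) :
    w.foldl (fun d foot => if d.contains foot then d.insert foot "wall" else d)
      (PySem.Dict.mk [("FL", v1), ("FR", v2), ("BL", v3), ("BR", v4)]) =
    PySem.Dict.mk [("FL", if w.contains "FL" then "wall" else v1),
                   ("FR", if w.contains "FR" then "wall" else v2),
                   ("BL", if w.contains "BL" then "wall" else v3),
                   ("BR", if w.contains "BR" then "wall" else v4)] := by
  induction w generalizing v1 v2 v3 v4 with
  | nil => simp
  | cons f rest ih =>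
    simp only [List.foldl, List.contains_cons]
    by_cases h1 : f = "FL"
    · subst h1
      have hc : (PySem.Dict.mk [("FL", v1), ("FR", v2), ("BL", v3), ("BR", v4)]).contains "FL" = true := by
        simp [PySem.Dict.contains_mk]
      have hi : (PySem.Dict.mk [("FL", v1), ("FR", v2), ("BL", v3), ("BR", v4)]).insert "FL" "wall"
          = PySem.Dict.mk [("FL", "wall"), ("FR", v2), ("BL", v3), ("BR", v4)] := by
        apply PySem.Dict.ext
        simp [PySem.Dict.items_insert, PySem.Dict.contains_mk]
      rw [hc, if_pos rfl, hi, ih]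
      simp
    · by_cases h2 : f = "FR"
      · subst h2
        have hc : (PySem.Dict.mk [("FL", v1), ("FR", v2), ("BL", v3), ("BR", v4)]).contains "FR" = true := by
          simp [PySem.Dict.contains_mk]
        have hi : (PySem.Dict.mk [("FL", v1), ("FR", v2), ("BL", v3), ("BR", v4)]).insert "FR" "wall"
            = PySem.Dict.mk [("FL", v1), ("FR", "wall"), ("BL", v3), ("BR", v4)] := by
          apply PySem.Dict.ext
          simp [PySem.Dict.items_insert, PySem.Dict.contains_mk]
        rw [hc, if_pos rfl, hi, ih]
        simp
      · by_cases h3 : f = "BL"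
        · subst h3
          have hc : (PySem.Dict.mk [("FL", v1), ("FR", v2), ("BL", v3), ("BR", v4)]).contains "BL" = true := by
            simp [PySem.Dict.contains_mk]
          have hi : (PySem.Dict.mk [("FL", v1), ("FR", v2), ("BL", v3), ("BR", v4)]).insert "BL" "wall"
              = PySem.Dict.mk [("FL", v1), ("FR", v2), ("BL", "wall"), ("BR", v4)] := by
            apply PySem.Dict.ext
            simp [PySem.Dict.items_insert, PySem.Dict.contains_mk]
          rw [hc, if_pos rfl, hi, ih]
          simp
        · by_cases h4 : f = "BR"
          · subst h4
            have hc : (PySem.Dict.mk [("FL", v1), ("FR", v2), ("BL", v3), ("BR", v4)]).contains "BR" = true := by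
              simp [PySem.Dict.contains_mk]
            have hi : (PySem.Dict.mk [("FL", v1), ("FR", v2), ("BL", v3), ("BR", v4)]).insert "BR" "wall"
                = PySem.Dict.mk [("FL", v1), ("FR", v2), ("BL", v3), ("BR", "wall")] := by
              apply PySem.Dict.ext
              simp [PySem.Dict.items_insert, PySem.Dict.contains_mk]
            rw [hc, if_pos rfl, hi, ih]
            simp
          · have hc : (PySem.Dict.mk [("FL", v1), ("FR", v2), ("BL", v3), ("BR", v4)]).contains f = false := by
              simp only [PySem.Dict.contains_mk]
              simp
              exact ⟨Ne.symm h1, Ne.symm h2, Ne.symm h3, Ne.symm h4⟩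
            rw [hc, if_neg (by simp), ih]
            have e1 : ("FL" == f) = false := by simp; exact Ne.symm h1
            have e2 : ("FR" == f) = false := by simp; exact Ne.symm h2
            have e3 : ("BL" == f) = false := by simp; exact Ne.symm h3
            have e4 : ("BR" == f) = false := by simp; exact Ne.symm h4
            rw [e1, e2, e3, e4]
            simp

-- ===== VERDICT (by name: the statement is the Claim_ definition above) =====
theorem foot_surfaces_py_spec : Claim_equal_foot_surfaces_py := by
  intro s w _
  unfold Spec_foot_surfaces_py
  rw [pv_portA_items]
  unfold foot_surfaces_py_alt pvFEET
  have h0 : (["FL", "FR", "BL", "BR"].foldl (fun d foot => d.insert foot "floor")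
      (PySem.Dict.empty : PySem.Dict String String))
      = PySem.Dict.mk [("FL", "floor"), ("FR", "floor"), ("BL", "floor"), ("BR", "floor")] := by
    rfl
  simp only []
  rw [h0, pv_loopB]
  by_cases hs1 : s = "FL"
  · subst hs1; simp [PySem.Dict.contains_mk, PySem.Dict.items_insert]
  · by_cases hs2 : s = "FR"
    · subst hs2; simp [PySem.Dict.contains_mk, PySem.Dict.items_insert]
    · by_cases hs3 : s = "BL"
      · subst hs3; simp [PySem.Dict.contains_mk, PySem.Dict.items_insert]
      · by_cases hs4 : s = "BR"
        · subst hs4; simp [PySem.Dict.contains_mk, PySem.Dict.items_insert]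
        · have hc : (PySem.Dict.mk [("FL", if w.contains "FL" then "wall" else "floor"),
              ("FR", if w.contains "FR" then "wall" else "floor"),
              ("BL", if w.contains "BL" then "wall" else "floor"),
              ("BR", if w.contains "BR" then "wall" else "floor")]).contains s = false := by
            simp only [PySem.Dict.contains_mk]
            simp
            exact ⟨Ne.symm hs1, Ne.symm hs2, Ne.symm hs3, Ne.symm hs4⟩
          rw [hc]
          simp [Ne.symm hs1, Ne.symm hs2, Ne.symm hs3, Ne.symm hs4]
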